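-- pv_equiv track=rewrite | github.com/beauschwab/datahub-infa-autosys | examples/essbase-datahub-connector/src/essbase_datahub/extractors/calc_extractor.py | _merge_fix_contexts
-- ===== SOURCE A (Python) =====
-- def _merge_fix_contexts(fix_stack: list[dict[str, list[str]]]) -> dict[str, list[str]]:
--     """Merge nested FIX contexts into single context."""
--     merged: dict[str, list[str]] = {}
--     for fix_ctx in fix_stack:
--         for dim, members in fix_ctx.items():
--             if dim not in merged:
--                 merged[dim] = []
--             merged[dim].extend(m for m in members if m not in merged[dim])
--     return merged
-- ===== SOURCE B (Python) =====
-- def _merge_fix_contexts(fix_stack: list[dict[str, list[str]]]) -> dict[str, list[str]]: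
--     """Merge nested FIX contexts into single context."""
--     # Pass 1: gather every member into one per-dimension list (no dedup).
--     gathered: dict[str, list[str]] = {}
--     for fix_ctx in fix_stack:
--         for dim, members in fix_ctx.items():
--             gathered.setdefault(dim, []).extend(members)
--     # Pass 2: dedup each gathered list, keeping first occurrences in order.
--     return {dim: list(dict.fromkeys(members)) for dim, members in gathered.items()}
-- ===== Notes on version B (the rewrite author's own statement) =====
-- stated objective: alternative
-- what changed: Replaces the interleaved check-and-extend loop (per-member linear membership scans against the growing merged list) with a pure gather pass (setdefault+extend, no dedup) followed by a separate dedup pass using dict.fromkeys per dimension.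
import Mathlib
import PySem

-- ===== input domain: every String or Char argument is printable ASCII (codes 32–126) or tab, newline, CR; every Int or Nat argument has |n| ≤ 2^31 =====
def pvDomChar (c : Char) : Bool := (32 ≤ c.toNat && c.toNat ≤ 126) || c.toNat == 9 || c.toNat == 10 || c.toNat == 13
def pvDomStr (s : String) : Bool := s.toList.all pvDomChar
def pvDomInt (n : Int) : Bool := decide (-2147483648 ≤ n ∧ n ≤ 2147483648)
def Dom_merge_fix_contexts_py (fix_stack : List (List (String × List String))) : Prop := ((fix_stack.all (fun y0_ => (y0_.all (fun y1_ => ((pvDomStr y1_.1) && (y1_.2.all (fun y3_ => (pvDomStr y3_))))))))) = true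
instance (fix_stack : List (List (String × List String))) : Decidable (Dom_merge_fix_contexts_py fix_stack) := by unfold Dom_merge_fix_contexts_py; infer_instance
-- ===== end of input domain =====

-- B replaces A's interleaved check-and-extend loop by a pure gather pass plus a separate
-- dict.fromkeys dedup pass per dimension (objective: alternative decomposition).
-- ===== PORT A =====
-- 'merged[dim].extend(m for m in members if m not in merged[dim])': extend consumes the
-- generator lazily, so each appended member is seen by the later membership tests.
def pvExtendDedup (cur : List String) (members : List String) : List String :=
  members.foldl (fun lst m => if lst.contains m then lst else lst ++ [m]) cur

def merge_fix_contexts_py (fix_stack : List (List (String × List String))) : List (String × List String) :=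
  (fix_stack.foldl (fun merged fix_ctx =>
      (PySem.Dict.ofList fix_ctx).items.foldl (fun merged dm =>
        let m1 := if merged.contains dm.1 then merged else merged.insert dm.1 []
        m1.insert dm.1 (pvExtendDedup (m1.getD dm.1 []) dm.2)) merged)
    PySem.Dict.empty).items

-- ===== PORT B =====
def merge_fix_contexts_py_alt (fix_stack : List (List (String × List String))) : List (String × List String) :=
  let gathered := fix_stack.foldl (fun g fix_ctx =>
      (PySem.Dict.ofList fix_ctx).items.foldl (fun g dm =>
        g.insert dm.1 (g.getD dm.1 [] ++ dm.2)) g)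
    PySem.Dict.empty
  -- the dict comprehension: 'gathered' has distinct keys, so it is this map over its items
  gathered.items.map (fun dm => (dm.1, PySem.List.dedup dm.2))

-- ===== PRECONDITION & SPEC =====
def Spec_merge_fix_contexts_py (fix_stack : List (List (String × List String))) (out : List (String × List String)) : Prop := out = merge_fix_contexts_py_alt fix_stack
instance (fix_stack : List (List (String × List String))) (out : List (String × List String)) : Decidable (Spec_merge_fix_contexts_py fix_stack out) := by unfold Spec_merge_fix_contexts_py; infer_instance

-- ===== CLAIM (what is proved, stated in full; the proofs are below) =====
def Claim_equal_merge_fix_contexts_py : Prop := ∀ (fix_stack : List (List (String × List String))), Dom_merge_fix_contexts_py fix_stack → Spec_merge_fix_contexts_py fix_stack (merge_fix_contexts_py fix_stack)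

-- ===== LEMMAS AND PROOFS =====

-- a dict whose values are the dedup of g's values, key for key, in the same order
def pvMapDedup (g : PySem.Dict String (List String)) : PySem.Dict String (List String) :=
  PySem.Dict.mk (g.items.map (fun p => (p.1, PySem.List.dedup p.2)))

theorem pv_contains (g : PySem.Dict String (List String)) (k : String) :
    (pvMapDedup g).contains k = g.contains k := by
  simp only [pvMapDedup, PySem.Dict.contains, List.any_map]
  rfl

theorem pv_get? (g : PySem.Dict String (List String)) (k : String) :
    (pvMapDedup g).get? k = (g.get? k).map (fun v => PySem.List.dedup v) := by
  simp only [pvMapDedup, PySem.Dict.get?, List.find?_map, Option.map_map]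
  rfl

theorem pv_getD (g : PySem.Dict String (List String)) (k : String) :
    (pvMapDedup g).getD k [] = PySem.List.dedup (g.getD k []) := by
  simp only [PySem.Dict.getD, pv_get?]
  cases g.get? k <;> rfl

theorem pv_insert (g : PySem.Dict String (List String)) (k : String) (v : List String) :
    (pvMapDedup g).insert k (PySem.List.dedup v) = pvMapDedup (g.insert k v) := by
  apply PySem.Dict.ext
  show ((pvMapDedup g).insert k (PySem.List.dedup v)).items
      = (g.insert k v).items.map (fun p => (p.1, PySem.List.dedup p.2))
  rw [PySem.Dict.items_insert, PySem.Dict.items_insert, pv_contains]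
  by_cases h : g.contains k = true
  · simp only [if_pos h, pvMapDedup, List.map_map]
    apply List.map_congr_left
    intro p _
    by_cases hp : p.1 = k <;> simp [hp]
  · simp [if_neg h, pvMapDedup]

theorem pv_extend (a b : List String) :
    pvExtendDedup (PySem.List.dedup a) b = PySem.List.dedup (a ++ b) := by
  simp only [pvExtendDedup, PySem.List.dedup, PySem.Set.ofList, List.foldl_append]
  rfl

theorem pv_step (g : PySem.Dict String (List String)) (dm : String × List String) :
    (let m1 := if (pvMapDedup g).contains dm.1 then pvMapDedup g
               else (pvMapDedup g).insert dm.1 []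
     m1.insert dm.1 (pvExtendDedup (m1.getD dm.1 []) dm.2))
      = pvMapDedup (g.insert dm.1 (g.getD dm.1 [] ++ dm.2)) := by
  cases h : g.contains dm.1 with
  | true =>
    simp only [pv_contains, h, if_pos, pv_getD, pv_extend, pv_insert]
  | false =>
    have hd : g.getD dm.1 [] = [] := PySem.Dict.getD_of_not_contains g [] h
    have hins : (pvMapDedup g).insert dm.1 [] = pvMapDedup (g.insert dm.1 []) :=
      pv_insert g dm.1 []
    have he : pvExtendDedup [] dm.2 = PySem.List.dedup dm.2 := pv_extend [] dm.2
    simp only [pv_contains, h, Bool.false_eq_true, if_false]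
    rw [PySem.Dict.getD_insert_self, he, hins, pv_insert,
      PySem.Dict.insert_insert_self, hd]
    rfl

theorem pv_inner (l : List (String × List String)) :
    ∀ g : PySem.Dict String (List String),
      l.foldl (fun merged dm =>
          let m1 := if merged.contains dm.1 then merged else merged.insert dm.1 []
          m1.insert dm.1 (pvExtendDedup (m1.getD dm.1 []) dm.2)) (pvMapDedup g)
        = pvMapDedup (l.foldl (fun g dm => g.insert dm.1 (g.getD dm.1 [] ++ dm.2)) g) := by
  induction l with
  | nil => intro g; rfl
  | cons dm t ih =>
    intro g
    simp only [List.foldl_cons]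
    rw [pv_step g dm]
    exact ih _

theorem pv_outer (fs : List (List (String × List String))) :
    ∀ g : PySem.Dict String (List String),
      fs.foldl (fun merged fix_ctx =>
          (PySem.Dict.ofList fix_ctx).items.foldl (fun merged dm =>
            let m1 := if merged.contains dm.1 then merged else merged.insert dm.1 []
            m1.insert dm.1 (pvExtendDedup (m1.getD dm.1 []) dm.2)) merged) (pvMapDedup g)
        = pvMapDedup (fs.foldl (fun g fix_ctx =>
            (PySem.Dict.ofList fix_ctx).items.foldl
              (fun g dm => g.insert dm.1 (g.getD dm.1 [] ++ dm.2)) g) g) := by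
  induction fs with
  | nil => intro g; rfl
  | cons c t ih =>
    intro g
    simp only [List.foldl_cons]
    rw [pv_inner (PySem.Dict.ofList c).items g]
    exact ih _

-- ===== VERDICT (by name: the statement is the Claim_ definition above) =====
theorem merge_fix_contexts_py_spec : Claim_equal_merge_fix_contexts_py := by
  unfold Claim_equal_merge_fix_contexts_py Spec_merge_fix_contexts_py
  intro fs _
  show (fs.foldl _ (pvMapDedup PySem.Dict.empty)).items = _
  rw [pv_outer fs PySem.Dict.empty]
  rfl
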